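/- GENERATED by tools/from_farm_form.py from prooffarm-gif/accepted/DGifSlurp.1/Proof.lean (a worked proof of the farm's unit `DGifSlurp.1`,
   accepted by the verdict) — do not edit. -/
import Gif.Spec.Units.DGifSlurp_1
import Gif.Spec.AllSegs

open X86 X86.User Asan ProgX.Base ProgX.Base.Spec Gif.Spec

set_option maxRecDepth 4000
set_option maxHeartbeats 4000000

namespace Gif.Spec.DGifSlurp_1

/-- **10A6D3H … 10A82AH** (dgif_lib.c:1193-1194): the checked store `gif.ExtensionBlocks = NULL`, the checked store
`gif.ExtensionBlockCount = 0`, `jmp` to the head of the record loop. -/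
theorem sl1_seg (Lay : Layout) (hLay : Lay.hi = 0x1000000) (μ : Microarch) (hμ : UserX.MicroOK μ) (u₀ : State)
    (hcode : HasCodeNat Lay u₀ Gif.L.DGifSlurp.entry Gif.Code.code_DGifSlurp.nat Gif.L.DGifSlurp.size)
    (h_asan_store8_noabort : Asan.SmallCheck Lay μ ProgX.Base.WayInv (ProgX.Base.CodeOK u₀) [.rax, .rcx, .rdx] 8
      ProgX.Base.L.__asan_store8_noabort.entry)
    (h_asan_store4_noabort : Asan.SmallCheck Lay μ ProgX.Base.WayInv (ProgX.Base.CodeOK u₀) [.rax, .rcx, .rdx] 4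
      ProgX.Base.L.__asan_store4_noabort.entry)
    (H : Heap) (rest : List Obj) (frames : List (Nat × FrameLayout)) (F : Forest) (R : Rd) (e : State) (ret : Word)
    (v : State) (hat : DGifSlurp.Start H rest frames F R u₀ e ret v) :
    ReachVia Lay μ ProgX.Base.WayInv v (fun w =>
      ∃ (Fc : Forest) (m : Nat), DGifSlurp.Head H rest frames F R H Fc m u₀ e ret w) := by
  -- THE PRELUDE: the entry assertion `Start` = `At` (= `Core` + the present heap and forest) + `rdi = gif`
  obtain ⟨hat0, c_rdi⟩ := hat
  obtain ⟨hcore, hregion, hgifeq, hpveq, hinv, hok⟩ := hat0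
  have he := hcore.entry
  v_entry he
  obtain ⟨henv, hrdi, hcomplete⟩ := hcore.pre
  have w_rip := hcore.rip
  have c_rsp : v.reg .rsp = e.reg .rsp - 152 := hcore.rsp
  have c_rbp : v.reg .rbp = e.reg .rdi := hcore.rbp
  have w_kept : RegsKept [.rsp] v v := RegsKept.refl _ _
  have w_eq : Mem.EqOn ProgX.Base.L.textLo ProgX.Base.L.textHi u₀.mem v.mem := ProgX.Base.conv_code_eqOn hcore.code
  have hdf := (show abiInv _ from hcore.abi).1
  have hmx := (show abiInv _ from hcore.abi).2
  have hsse := ProgX.Base.sseOK_of_abiInv hcore.abi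
  -- the slots and the footprint that `Core` at the exit states again
  have k_r15 : v.mem.readLE (e.reg .rsp - 8) 8 = (e.reg .r15).toNat := hcore.slot_r15
  have k_r14 : v.mem.readLE (e.reg .rsp - 16) 8 = (e.reg .r14).toNat := hcore.slot_r14
  have k_r13 : v.mem.readLE (e.reg .rsp - 24) 8 = (e.reg .r13).toNat := hcore.slot_r13
  have k_r12 : v.mem.readLE (e.reg .rsp - 32) 8 = (e.reg .r12).toNat := hcore.slot_r12
  have k_rbp : v.mem.readLE (e.reg .rsp - 40) 8 = (e.reg .rbp).toNat := hcore.slot_rbp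
  have k_rbx : v.mem.readLE (e.reg .rsp - 48) 8 = (e.reg .rbx).toNat := hcore.slot_rbx
  have k_ra : UInt64.ofNat (v.mem.readLE (e.reg .rsp) 8) = ret := hcore.slot_ra
  have hsame : Mem.SameExcept
    [⟨(e.reg .rsp).toNat - 848, (e.reg .rsp).toNat⟩,
     shadowSpan ((e.reg .rsp).toNat - 152) ((e.reg .rsp).toNat - 56),
     ⟨0x800000, 0x1000020⟩,
     ⟨R.cur, R.cur + 8⟩] e.mem v.mem := hcore.same
  -- where the cursor and gif are, as numbers (`v_side`, `u_same`, `u_omega` place every store with them)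
  have hcur := henv.ctx.cursor_range henv.heap.inv.shadow
  have hgin := henv.ok.owns.inside henv.heap.inv.heap (o := (F.gif, 120)) List.mem_cons_self
  have hbase := henv.heap.base
  simp only at hgin
  rw [hbase] at hgin
  have hg1 : 0x800040 ≤ F.gif := hgin.1
  have hg2 : F.gif + 120 + 32 ≤ 0xC00000 := hgin.2.2.2.2
  clear hgin
  have hgl : LiveIn (H.liveObjs ++ rest) (DGifSlurp.framesIn frames e) F.gif 120 :=
    hok.gif_live.liveIn rest _ (Nat.le_refl _) (Nat.le_refl _)
  u_walk hcode [hμ.vendor] until [Gif.L.DGifSlurp.at_10a82a] span [ProgX.Base.L.textLo, ProgX.Base.L.textHi] side (v_side)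
  case check_10a6d7 =>
    -- dgif_lib.c:1193 the store of `gif.ExtensionBlocks`: 8 bytes inside gif
    have hun : ShadowUntouched v.mem s_10a6d7.mem := by v_untouched
    exact hgl.accSmall hinv.shadow hun _ 8 (by decide) (by u_omega) (by u_omega)
  case check_10a6e8 =>
    -- dgif_lib.c:1194 the store of `gif.ExtensionBlockCount`: 4 bytes inside gif
    have hun : ShadowUntouched v.mem s_10a6e8.mem := by v_untouched
    exact hgl.accSmall hinv.shadow hun _ 4 (by decide) (by u_omega) (by u_omega)
  -- 0x10a82a: THE HEAD OF THE RECORD LOOP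
  -- the address of gif in `rdi` at the entry, as a number
  have hga : (e.reg .rdi + 88).toNat = F.gif + 88 := by u_omega
  have hgc : (e.reg .rdi + 80).toNat = F.gif + 80 := by u_omega
  have hra : (e.reg .rsp - 160).toNat = (e.reg .rsp).toNat - 160 := by u_omega
  -- THE HEAP'S INVARIANT over the four stores: the two return addresses of the check calls (stack), the two fields of gif (live)
  have hinvA := hinv.writeLE_out (e.reg .rsp - 160) 8 1091292 (by omega) (Or.inl (by omega)) (Or.inl (by omega))
  have hinvB := hinvA.writeLE_live hok.gif_live (e.reg .rdi + 88) 8 0 (by omega) (by omega)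
  have hinvC := hinvB.writeLE_out (e.reg .rsp - 160) 8 1091309 (by omega) (Or.inl (by omega)) (Or.inl (by omega))
  have hinvD := hinvC.writeLE_live hok.gif_live (e.reg .rdi + 80) 4 0 (by omega) (by omega)
  rw [← w_mem] at hinvD
  -- the footprint since `v`: the slot of the check calls' return address, the two fields
  have hs : Mem.SameExcept
    [⟨(e.reg .rsp).toNat - 160, (e.reg .rsp).toNat - 152⟩,
     ⟨F.gif + 88, F.gif + 96⟩,
     ⟨F.gif + 80, F.gif + 84⟩] v.mem s_10a6f4.mem := by
    rw [w_mem]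
    u_same
  -- the reader's measure: none of the three windows meets the cursor
  have hrem : rem R s_10a6f4.mem = rem R v.mem := by
    apply rem_sameExcept hs (by omega)
    intro w hw
    simp only [List.mem_cons, List.not_mem_nil, or_false] at hw
    rcases hw with hw | hw | hw
    · rw [hw]
      simp only
      omega
    · rw [hw]
      simp only
      omega
    · rw [hw]
      simp only
      omega
  -- THE TWO FIELDS READ BACK: `gif.ExtensionBlocks = 0`, `gif.ExtensionBlockCount = 0`
  have hblocks : rd s_10a6f4.mem (F.gif + 88) 8 = 0 := by
    rw [w_mem]
    rw [rd_writeLE_disjoint _ _ _ _ _ _ (by omega) (by omega) (by omega)]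
    rw [rd_writeLE_disjoint _ _ _ _ _ _ (by omega) (by omega) (by omega)]
    rw [rd_writeLE_same _ (e.reg .rdi + 88) 8 0 _ hga (by decide)]
  have hcount : rd s_10a6f4.mem (F.gif + 80) 4 = 0 := by
    rw [w_mem]
    rw [rd_writeLE_same _ (e.reg .rdi + 80) 4 0 _ hgc (by decide)]
  -- THE SHAPE: one step `Shape.set_pend` with `none`
  have hshape : Shape { F with pend := none } R s_10a6f4.mem := by
    apply hok.shape.set_pend (hok.owns.placed hinv.heap) hinv.heap ⟨hcur.1, hcur.2.1⟩ hs
    · intro w hw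
      simp only [List.mem_cons, List.not_mem_nil, or_false] at hw
      rcases hw with hw | hw | hw
      · left
        rw [hw]
        apply Loose.stack hinv.heap
        · simp only
          omega
        · simp only
          omega
        · simp only
          omega
      · right
        left
        rw [hw]
        simp only
        omega
      · right
        right
        left
        rw [hw]
        simp only
        omega
    · simp only [gfield]
      exact ⟨hblocks, hcount⟩
  -- THE STATE INVARIANT for the forest without its pending list: it owns a sublist
  have hok1 : GifOK H { F with pend := none } R s_10a6f4.mem :=
    ⟨hok.owns.sublist (DGifSlurp.owned_drop_pend F), hshape⟩
  -- THE EXIT ASSERTION: `Core` at 0x10a82a …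
  have hcore1 : DGifSlurp.Core Gif.L.DGifSlurp.at_10a82a H rest frames F R u₀ e ret s_10a6f4 := {
    entry := hcore.entry
    pre := hcore.pre
    rip := w_rip
    rsp := w_rsp
    rbp := (w_kept.get .rbp rfl).trans hcore.rbp
    r14 := (w_kept.get .r14 rfl).trans hcore.r14
    slot_r15 := by
      rw [w_mem]
      u_frame k_r15
    slot_r14 := by
      rw [w_mem]
      u_frame k_r14
    slot_r13 := by
      rw [w_mem]
      u_frame k_r13
    slot_r12 := by
      rw [w_mem]
      u_frame k_r12
    slot_rbp := by
      rw [w_mem]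
      u_frame k_rbp
    slot_rbx := by
      rw [w_mem]
      u_frame k_rbx
    slot_ra := by
      rw [w_mem]
      u_frame k_ra
    rem := by
      rw [hrem]
      exact hcore.rem
    same := by
      rw [w_mem]
      u_same
    code := ProgX.Base.conv_code_in w_eq
    abi := by
      refine ProgX.Base.abiInv_of ?_ ?_
      · rw [w_flags]
        exact w_df_10a6e8
      · rw [w_mxcsr]
        exact hmx
  }
  -- … `At` for the entry's heap and the forest without its pending list, `Complete` (it reads `saved` only), the measure
  refine ReachVia.done ?_
  refine ⟨{ F with pend := none }, rem R s_10a6f4.mem, ?_⟩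
  exact {
    at_ := {
      core := hcore1
      region := hregion
      gif := rfl
      pv := rfl
      inv := hinvD
      ok := hok1
    }
    complete := hcomplete
    meas := rfl
  }

end Gif.Spec.DGifSlurp_1

/-- Segment 1 of `DGifSlurp` takes `Start` at 0x10a6d3 to `Head` at 0x10a82a. -/
theorem Gif.Spec.Proved.DGifSlurp_1_ok : Gif.Spec.DGifSlurp_1.Statement := by
  intro Lay hLay μ hμ u₀ hcode h_asan_store8_noabort h_asan_store4_noabort H rest frames F R e ret v hat
  exact Gif.Spec.DGifSlurp_1.sl1_seg Lay hLay μ hμ u₀ hcode h_asan_store8_noabort h_asan_store4_noabort H rest frames F R e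
    ret v hat
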